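-- pv_equiv track=rewrite | github.com/acsa-laa/security_activity_2 | atv-1/desencriptar.py | gerarChaves
-- ===== SOURCE A (Python) =====
-- def gerarChaves(n,chave):
-- 	listaP10 = [3,5,2,7,4,10,1,9,8,6];
-- 	listaP8 = [6,3,7,4,8,5,10,9];
-- 	key = [0,0,0,0,0,0,0,0,0,0]
-- 	final = [0,0,0,0,0,0,0,0]
--
-- 	for i in range(0,10):
-- 		key[i] = chave[listaP10[i]-1];
--
-- 	for i in range(0,5):
-- 		if (i == 0):
-- 			aux = key[0];
-- 		if (i == 4):
-- 			key[4] = aux;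
-- 		else:
-- 			key[i] = key[i+1];
--
-- 	for i in range(5,10):
-- 		if (i == 5):
-- 			aux = key[5];
-- 		if (i == 9):
-- 			key[9] = aux;
-- 		else:
-- 			key[i] = key[i+1];
--
-- 	if (n == 2):
-- 		for i in range(0,2):
-- 			for i in range(0,5):
-- 				if (i == 0):
-- 					aux = key[0];
-- 				if (i == 4):
-- 					key[4] = aux;
-- 				else:
-- 					key[i] = key[i+1];
--
-- 			for i in range(5,10):
-- 				if (i == 5):
-- 					aux = key[5];
-- 				if (i == 9):
-- 					key[9] = aux;
-- 				else:
-- 					key[i] = key[i+1];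
--
-- 	for i in range(0,8):
-- 		final[i] = int(key[listaP8[i]-1]);
-- 	return final;
-- ===== SOURCE B (Python) =====
-- P10 = [3, 5, 2, 7, 4, 10, 1, 9, 8, 6]
-- P8 = [6, 3, 7, 4, 8, 5, 10, 9]
--
--
-- def permute(vec, table):
--     return [vec[t - 1] for t in table]
--
--
-- def gerarChaves(n, chave):
--     p10 = permute(chave, P10)
--     s = 3 if n == 2 else 1
--     left, right = p10[:5], p10[5:]
--     combined = left[s:] + left[:s] + right[s:] + right[:s]
--     return [int(x) for x in permute(combined, P8)]
-- ===== Notes on version B (the rewrite author's own statement) =====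
-- stated objective: simpler
-- what changed: Replaces A's four explicit index-shuffling loops (and the duplicated n==2 shift block) with a permute(vec, table) helper and one parameterised half-rotation by s = 3 if n==2 else 1 via slicing.
import Mathlib
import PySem

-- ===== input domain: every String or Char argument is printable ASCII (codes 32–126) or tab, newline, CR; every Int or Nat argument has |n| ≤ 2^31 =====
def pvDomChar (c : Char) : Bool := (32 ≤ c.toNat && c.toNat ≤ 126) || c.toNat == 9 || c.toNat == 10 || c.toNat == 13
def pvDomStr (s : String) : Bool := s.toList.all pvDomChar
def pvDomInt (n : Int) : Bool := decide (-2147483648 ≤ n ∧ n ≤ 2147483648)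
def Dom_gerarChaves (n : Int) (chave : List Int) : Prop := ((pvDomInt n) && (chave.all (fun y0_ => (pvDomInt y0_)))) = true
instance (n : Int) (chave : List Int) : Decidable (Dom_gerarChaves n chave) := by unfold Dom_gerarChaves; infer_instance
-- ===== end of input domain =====

-- B replaces A's index-shuffling loops and the duplicated n==2 shift block by a
-- permute helper and a single parameterised half-rotation (objective: simpler).

-- ===== PORT A =====
-- Python list indexing vec[i]; inside Pre_ every index is in range, so getD 0 never fires.
def pvAGet (xs : List Int) (i : Int) : Int := (PySem.List.pyGet? xs i).getD 0

-- for i in range(0,5): if i==0: aux=key[0]; if i==4: key[4]=aux else key[i]=key[i+1]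
def pvShiftLo (st : List Int × Int) (i : Int) : List Int × Int :=
  let key := st.1
  let aux := if i = 0 then pvAGet key 0 else st.2
  if i = 4 then (key.set 4 aux, aux) else (key.set i.toNat (pvAGet key (i + 1)), aux)

-- for i in range(5,10): if i==5: aux=key[5]; if i==9: key[9]=aux else key[i]=key[i+1]
def pvShiftHi (st : List Int × Int) (i : Int) : List Int × Int :=
  let key := st.1
  let aux := if i = 5 then pvAGet key 5 else st.2
  if i = 9 then (key.set 9 aux, aux) else (key.set i.toNat (pvAGet key (i + 1)), aux)

def pvShiftRound (st : List Int × Int) : List Int × Int :=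
  (PySem.List.pyRange 5 10 1).foldl pvShiftHi ((PySem.List.pyRange 0 5 1).foldl pvShiftLo st)

def gerarChaves (n : Int) (chave : List Int) : List Int :=
  let listaP10 : List Int := [3, 5, 2, 7, 4, 10, 1, 9, 8, 6]
  let listaP8 : List Int := [6, 3, 7, 4, 8, 5, 10, 9]
  let key : List Int := [0, 0, 0, 0, 0, 0, 0, 0, 0, 0]
  let final : List Int := [0, 0, 0, 0, 0, 0, 0, 0]
  -- for i in range(0,10): key[i] = chave[listaP10[i]-1]
  let key := (PySem.List.pyRange 0 10 1).foldl
    (fun k i => k.set i.toNat (pvAGet chave (pvAGet listaP10 i - 1))) key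
  let st := pvShiftRound (key, 0)
  -- if n == 2: repeat the two shift loops twice more
  let st := if n = 2 then (PySem.List.pyRange 0 2 1).foldl (fun s _ => pvShiftRound s) st else st
  -- for i in range(0,8): final[i] = int(key[listaP8[i]-1])
  (PySem.List.pyRange 0 8 1).foldl (fun f i => f.set i.toNat (pvAGet st.1 (pvAGet listaP8 i - 1))) final

-- ===== PORT B =====
def pvP10 : List Int := [3, 5, 2, 7, 4, 10, 1, 9, 8, 6]
def pvP8 : List Int := [6, 3, 7, 4, 8, 5, 10, 9]

-- permute(vec, table) = [vec[t-1] for t in table]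
def pvPermute (vec : List Int) (table : List Int) : List Int :=
  table.map (fun t => (PySem.List.pyGet? vec (t - 1)).getD 0)

def gerarChaves_alt (n : Int) (chave : List Int) : List Int :=
  let p10 := pvPermute chave pvP10
  let s : Nat := if n = 2 then 3 else 1   -- nonnegative shift, so h[s:]+h[:s] = drop s ++ take s (exact)
  let left := p10.take 5
  let right := p10.drop 5
  let combined := left.drop s ++ left.take s ++ (right.drop s ++ right.take s)
  (pvPermute combined pvP8).map (fun x => x)   -- int(x) is the identity on ints

-- ===== PRECONDITION & SPEC =====
-- Pre_ excludes only keys shorter than 10 bits, on which the Python A raises IndexError.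
def Pre_gerarChaves (n : Int) (chave : List Int) : Prop := 10 ≤ chave.length
instance (n : Int) (chave : List Int) : Decidable (Pre_gerarChaves n chave) := by
  unfold Pre_gerarChaves; infer_instance

def pvWitness_gerarChaves : Int × List Int := (1, [1, 0, 1, 0, 0, 0, 0, 0, 1, 0])

def Spec_gerarChaves (n : Int) (chave : List Int) (out : List Int) : Prop := out = gerarChaves_alt n chave
instance (n : Int) (chave : List Int) (out : List Int) : Decidable (Spec_gerarChaves n chave out) := by
  unfold Spec_gerarChaves; infer_instance

-- ===== CLAIM (what is proved, stated in full; the proofs are below) =====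
def Claim_equal_gerarChaves : Prop := ∀ (n : Int) (chave : List Int), Dom_gerarChaves n chave → Pre_gerarChaves n chave → Spec_gerarChaves n chave (gerarChaves n chave)

-- ===== LEMMAS AND PROOFS =====
theorem pvAGet_eq (xs : List Int) (i : Int) (h : 0 ≤ i) :
    pvAGet xs i = (xs[i.toNat]?).getD 0 := by
  simp [pvAGet, PySem.List.pyGet?_of_nonneg xs h]

theorem pyGet?_lit (xs : List Int) (i : Int) (h : 0 ≤ i) :
    PySem.List.pyGet? xs i = xs[i.toNat]? := PySem.List.pyGet?_of_nonneg xs h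

theorem pvRange_0_10 : PySem.List.pyRange 0 10 1 = [0,1,2,3,4,5,6,7,8,9] := by decide
theorem pvRange_0_5 : PySem.List.pyRange 0 5 1 = [0,1,2,3,4] := by decide
theorem pvRange_5_10 : PySem.List.pyRange 5 10 1 = [5,6,7,8,9] := by decide
theorem pvRange_0_2 : PySem.List.pyRange 0 2 1 = [0,1] := by decide
theorem pvRange_0_8 : PySem.List.pyRange 0 8 1 = [0,1,2,3,4,5,6,7] := by decide

set_option maxHeartbeats 2000000 in
theorem gerarChaves_ten (n c0 c1 c2 c3 c4 c5 c6 c7 c8 c9 : Int) (rest : List Int) :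
    gerarChaves n (c0::c1::c2::c3::c4::c5::c6::c7::c8::c9::rest)
      = gerarChaves_alt n (c0::c1::c2::c3::c4::c5::c6::c7::c8::c9::rest) := by
  by_cases h : n = 2 <;>
    simp [gerarChaves, gerarChaves_alt, pvShiftRound, pvShiftLo, pvShiftHi, pvPermute,
      pvP10, pvP8, pvRange_0_10, pvRange_0_5, pvRange_5_10, pvRange_0_2, pvRange_0_8,
      pvAGet_eq, pyGet?_lit, List.set, h]

-- ===== VERDICT (by name: the statement is the Claim_ definition above) =====
theorem gerarChaves_spec : Claim_equal_gerarChaves := by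
  intro n chave _ hpre
  unfold Pre_gerarChaves at hpre
  unfold Spec_gerarChaves
  match chave, hpre with
  | c0::c1::c2::c3::c4::c5::c6::c7::c8::c9::rest, _ =>
    exact gerarChaves_ten n c0 c1 c2 c3 c4 c5 c6 c7 c8 c9 rest
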